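-- pv_equiv track=rewrite | github.com/jahyunlee00299/ASMC | examples/active_site_detection/predict_pockets_simple.py | cluster_sequential_residues
-- ===== SOURCE A (Python) =====
-- def cluster_sequential_residues(pocket_residues, gap_tolerance=10):
--     """
--     Group pocket residues into spatial/sequential clusters
--
--     Args:
--         pocket_residues: list of (res_num, res_name, score) tuples
--         gap_tolerance: Maximum gap between residues in same cluster
--
--     Returns:
--         list: List of clusters (each cluster is a list of residues)
--     """
--     if not pocket_residues:
--         return []
--
--     # Sort by residue number
--     sorted_res = sorted(pocket_residues, key=lambda x: x[0])
--
--     clusters = []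
--     current_cluster = [sorted_res[0]]
--
--     for i in range(1, len(sorted_res)):
--         prev_num = sorted_res[i-1][0]
--         curr_num = sorted_res[i][0]
--
--         if curr_num - prev_num <= gap_tolerance:
--             current_cluster.append(sorted_res[i])
--         else:
--             if len(current_cluster) >= 3:  # Minimum cluster size
--                 clusters.append(current_cluster)
--             current_cluster = [sorted_res[i]]
--
--     # Don't forget last cluster
--     if len(current_cluster) >= 3:
--         clusters.append(current_cluster)
--
--     return clusters
-- ===== SOURCE B (Python) =====
-- def cluster_sequential_residues(pocket_residues, gap_tolerance=10):
--     s = sorted(pocket_residues, key=lambda x: x[0])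
--     n = len(s)
--     bounds = [i for i in range(1, n) if s[i][0] - s[i - 1][0] > gap_tolerance]
--     cuts = [0] + bounds + [n]
--     runs = [s[a:b] for a, b in zip(cuts, cuts[1:])]
--     return [r for r in runs if len(r) >= 3]
-- ===== Notes on version B (the rewrite author's own statement) =====
-- stated objective: alternative
-- what changed: Instead of A's single accumulation loop that grows a current_cluster and flushes it at each large gap, B computes the list of boundary indices in one pass, partitions the sorted list by slicing between consecutive cut points, and filters the resulting runs by minimum size.
import Mathlib
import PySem

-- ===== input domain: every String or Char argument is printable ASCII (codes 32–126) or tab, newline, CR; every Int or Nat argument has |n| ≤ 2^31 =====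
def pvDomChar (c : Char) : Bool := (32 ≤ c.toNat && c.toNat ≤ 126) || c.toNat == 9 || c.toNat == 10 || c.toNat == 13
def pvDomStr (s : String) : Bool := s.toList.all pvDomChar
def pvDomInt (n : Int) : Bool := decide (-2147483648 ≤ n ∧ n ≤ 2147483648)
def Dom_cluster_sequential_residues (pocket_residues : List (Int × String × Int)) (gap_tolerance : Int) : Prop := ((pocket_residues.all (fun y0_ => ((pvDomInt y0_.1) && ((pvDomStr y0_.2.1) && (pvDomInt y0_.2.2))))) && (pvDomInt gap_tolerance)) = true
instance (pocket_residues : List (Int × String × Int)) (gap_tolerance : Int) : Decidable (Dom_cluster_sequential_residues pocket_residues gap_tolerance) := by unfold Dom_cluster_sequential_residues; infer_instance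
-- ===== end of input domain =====

-- B replaces A's accumulating current_cluster loop by a different decomposition:
-- one pass collecting gap-boundary indices, then slicing the sorted list between
-- consecutive cut points, then filtering runs of length ≥ 3 (objective: alternative).

def pvResDefault : Int × String × Int := (0, "", 0)

-- ===== PORT A =====
def cluster_sequential_residues (pocket_residues : List (Int × String × Int)) (gap_tolerance : Int) : List (List (Int × String × Int)) :=
  if pocket_residues = [] then []
  else
    let sorted_res := PySem.List.sorted pocket_residues (fun x => x.1) false
    let st := (PySem.List.pyRange 1 (sorted_res.length : Int) 1).foldl
      (fun (st : List (List (Int × String × Int)) × List (Int × String × Int)) i =>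
        let prev_num := (PySem.List.pyGetD sorted_res (i - 1) pvResDefault).1
        let curr_num := (PySem.List.pyGetD sorted_res i pvResDefault).1
        if curr_num - prev_num ≤ gap_tolerance then
          (st.1, st.2 ++ [PySem.List.pyGetD sorted_res i pvResDefault])
        else
          ((if 3 ≤ st.2.length then st.1 ++ [st.2] else st.1),
           [PySem.List.pyGetD sorted_res i pvResDefault]))
      ([], [PySem.List.pyGetD sorted_res 0 pvResDefault])
    if 3 ≤ st.2.length then st.1 ++ [st.2] else st.1

-- ===== PORT B =====
def cluster_sequential_residues_alt (pocket_residues : List (Int × String × Int)) (gap_tolerance : Int) : List (List (Int × String × Int)) :=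
  let s := PySem.List.sorted pocket_residues (fun x => x.1) false
  let n : Int := s.length
  let bounds := (PySem.List.pyRange 1 n 1).filter (fun i =>
    decide (gap_tolerance < (PySem.List.pyGetD s i pvResDefault).1 - (PySem.List.pyGetD s (i - 1) pvResDefault).1))
  let cuts := 0 :: (bounds ++ [n])
  let runs := (cuts.zip cuts.tail).map (fun ab => PySem.List.slice s (some ab.1) (some ab.2))
  runs.filter (fun r => decide (3 ≤ r.length))

-- ===== PRECONDITION & SPEC =====
def Spec_cluster_sequential_residues (pocket_residues : List (Int × String × Int)) (gap_tolerance : Int) (out : List (List (Int × String × Int))) : Prop := out = cluster_sequential_residues_alt pocket_residues gap_tolerance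
instance (pocket_residues : List (Int × String × Int)) (gap_tolerance : Int) (out : List (List (Int × String × Int))) : Decidable (Spec_cluster_sequential_residues pocket_residues gap_tolerance out) := by unfold Spec_cluster_sequential_residues; infer_instance

-- ===== CLAIM (what is proved, stated in full; the proofs are below) =====
def Claim_equal_cluster_sequential_residues : Prop := ∀ (pocket_residues : List (Int × String × Int)) (gap_tolerance : Int), Dom_cluster_sequential_residues pocket_residues gap_tolerance → Spec_cluster_sequential_residues pocket_residues gap_tolerance (cluster_sequential_residues pocket_residues gap_tolerance)

-- ===== LEMMAS AND PROOFS =====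

-- The common description both programs compute: maximal runs of the sorted list in
-- which consecutive residue numbers differ by at most gap_tolerance; then filter by size.
def pvRuns (gap : Int) : List (Int × String × Int) → List (List (Int × String × Int))
  | [] => []
  | [x] => [[x]]
  | x :: y :: t =>
    if y.1 - x.1 ≤ gap then
      match pvRuns gap (y :: t) with
      | [] => [[x]]
      | r :: rs => (x :: r) :: rs
    else [x] :: pvRuns gap (y :: t)

-- prepend a prefix onto the first run
def pvMapHead (pre : List (Int × String × Int)) : List (List (Int × String × Int)) → List (List (Int × String × Int))
  | [] => []
  | r :: rs => (pre ++ r) :: rs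

lemma pvMapHead_nil (l : List (List (Int × String × Int))) : pvMapHead [] l = l := by
  cases l <;> simp [pvMapHead]

lemma pvRuns_ne_nil (gap : Int) (s : List (Int × String × Int)) (h : s ≠ []) :
    pvRuns gap s ≠ [] := by
  match s with
  | [x] => simp [pvRuns]
  | x :: y :: t =>
    rw [pvRuns]
    split
    · match hr : pvRuns gap (y :: t) with
      | [] => simp
      | r :: rs => simp
    · simp

-- ----- A side -----

lemma pvZip_eq_map_range (s : List (Int × String × Int)) :
    s.zip s.tail = (List.range (s.length - 1)).map
      (fun k => (s.getD k pvResDefault, s.getD (k+1) pvResDefault)) := by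
  apply List.ext_getElem
  · simp [List.length_zip, List.length_tail]
  · intro k h1 h2
    simp only [List.getElem_zip, List.getElem_map, List.getElem_range, List.getElem_tail]
    have hlen : k + 1 < s.length := by
      simp [List.length_zip, List.length_tail] at h1; omega
    rw [List.getD_eq_getElem s pvResDefault (by omega), List.getD_eq_getElem s pvResDefault hlen]

-- the index-based fold over range(1, len(s)) is the fold over adjacent pairs
lemma pvFoldA_pairs {σ : Type} (s : List (Int × String × Int))
    (F : (Int × String × Int) → (Int × String × Int) → σ → σ) (st : σ) :
    (PySem.List.pyRange 1 (s.length : Int) 1).foldl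
      (fun st i => F (PySem.List.pyGetD s (i - 1) pvResDefault) (PySem.List.pyGetD s i pvResDefault) st) st
    = (s.zip s.tail).foldl (fun st pc => F pc.1 pc.2 st) st := by
  rw [PySem.List.pyRange_one, pvZip_eq_map_range, List.foldl_map, List.foldl_map]
  have hm : ((s.length : Int) - 1).toNat = s.length - 1 := by omega
  rw [hm]
  apply PySem.List.foldl_congr_mem
  intro acc k hk
  have hk' : k < s.length - 1 := List.mem_range.mp hk
  have e1 : (1 : Int) + (k : Int) - 1 = ((k : Nat) : Int) := by omega
  have e2 : (1 : Int) + (k : Int) = (((k + 1 : Nat)) : Int) := by push_cast; omega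
  rw [e1, e2, PySem.List.pyGetD_natCast, PySem.List.pyGetD_natCast]

-- A's loop plus the final flush equals clusters ++ size-filter of the runs,
-- with the (unfinished) prefix pre glued onto the first run
lemma pvLoopA_eq (gap : Int) :
    ∀ (t : List (Int × String × Int)) (prev : (Int × String × Int))
      (clusters : List (List (Int × String × Int))) (pre : List (Int × String × Int)),
    (let st := ((prev :: t).zip t).foldl
        (fun (st : List (List (Int × String × Int)) × List (Int × String × Int)) pc =>
          if pc.2.1 - pc.1.1 ≤ gap then (st.1, st.2 ++ [pc.2])
          else ((if 3 ≤ st.2.length then st.1 ++ [st.2] else st.1), [pc.2]))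
        (clusters, pre ++ [prev]);
      if 3 ≤ st.2.length then st.1 ++ [st.2] else st.1)
    = clusters ++ (pvMapHead pre (pvRuns gap (prev :: t))).filter (fun r => decide (3 ≤ r.length)) := by
  intro t
  induction t with
  | nil =>
    intro prev clusters pre
    simp [pvRuns, pvMapHead, List.filter]
    split_ifs with h1
    · have : decide (2 ≤ pre.length) = true := by simp; omega
      simp [this]
    · have : decide (2 ≤ pre.length) = false := by simp; omega
      simp [this]
  | cons c t' ih =>
    intro prev clusters pre
    obtain ⟨r, rs, hr⟩ : ∃ r rs, pvRuns gap (c :: t') = r :: rs := by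
      rcases h : pvRuns gap (c :: t') with _ | ⟨r, rs⟩
      · exact absurd h (pvRuns_ne_nil gap _ (by simp))
      · exact ⟨r, rs, rfl⟩
    simp only [List.zip_cons_cons, List.foldl_cons]
    by_cases hg : c.1 - prev.1 ≤ gap
    · simp only [hg, if_pos]
      have h2 := ih c clusters (pre ++ [prev])
      simp only at h2
      rw [h2]
      rw [pvRuns]
      simp only [hg, if_pos, hr]
      simp only [pvMapHead]
      have hass : pre ++ (prev :: r) = (pre ++ [prev]) ++ r := by simp
      rw [hass]
    · simp only [hg, if_false]
      have h2 := ih c (if 3 ≤ (pre ++ [prev]).length then clusters ++ [pre ++ [prev]] else clusters) []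
      simp only [List.nil_append] at h2
      rw [h2]
      rw [pvRuns]
      simp only [hg, if_false]
      rw [hr]
      simp only [pvMapHead, List.nil_append]
      by_cases h3 : 3 ≤ (pre ++ [prev]).length
      · rw [if_pos h3, List.filter_cons_of_pos (l := r :: rs) (a := pre ++ [prev]) (by simp only [decide_eq_true_eq]; exact h3)]
        simp [List.append_assoc]
      · rw [if_neg h3, List.filter_cons_of_neg (l := r :: rs) (a := pre ++ [prev]) (by simp only [decide_eq_true_eq]; exact h3)]

-- ----- B side -----

def pvSlices (s : List (Int × String × Int)) (cuts : List Int) : List (List (Int × String × Int)) :=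
  (cuts.zip cuts.tail).map (fun ab => PySem.List.slice s (some ab.1) (some ab.2))

lemma pvSlices_cons (s : List (Int × String × Int)) (a b : Int) (l : List Int) :
    pvSlices s (a :: b :: l) = PySem.List.slice s (some a) (some b) :: pvSlices s (b :: l) := rfl

lemma pvSlice_cons_step (s : List (Int × String × Int)) (k : Nat) (b : Int) (hk : k < s.length) (hb : (k : Int) < b) :
    PySem.List.slice s (some (k : Int)) (some b)
      = s[k] :: PySem.List.slice s (some ((k : Int) + 1)) (some b) := by
  have h1 : ((k : Int) + 1) = ((k + 1 : Nat) : Int) := by push_cast; ring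
  rw [h1, PySem.List.slice_toNat _ (by positivity) (by omega),
      PySem.List.slice_toNat _ (by positivity) (by omega)]
  have hto : ((k : Int)).toNat = k := by omega
  have hto1 : (((k+1 : Nat) : Int)).toNat = k + 1 := by omega
  rw [hto, hto1]
  have h2 : b.toNat - k = (b.toNat - (k+1)) + 1 := by omega
  rw [h2]
  conv_lhs => rw [List.drop_eq_getElem_cons hk]
  rw [List.take_succ_cons]

-- slicing the sorted list at the gap boundaries from position k on yields the runs of the k-th suffix
lemma pvSlices_eq_aux (gap : Int) (s : List (Int × String × Int)) :
    ∀ (n k : Nat), k < s.length → s.length - k = n →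
    pvSlices s ((k : Int) ::
        ((PySem.List.pyRange ((k : Int) + 1) (s.length : Int) 1).filter (fun i =>
          decide (gap < (PySem.List.pyGetD s i pvResDefault).1 - (PySem.List.pyGetD s (i - 1) pvResDefault).1))
         ++ [(s.length : Int)]))
    = pvRuns gap (s.drop k) := by
  intro n
  induction n with
  | zero => intro k hk hn; omega
  | succ n ih =>
    intro k hk hn
    by_cases hk1 : k + 1 = s.length
    · -- k is the last index: no boundaries remain, one singleton run
      rw [PySem.List.pyRange_one_eq_nil (by omega)]
      simp only [List.filter_nil, List.nil_append]
      have hdrop : s.drop k = [s[k]] := by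
        rw [List.drop_eq_getElem_cons hk, List.drop_eq_nil_of_le (by omega)]
      have hslice : PySem.List.slice s (some (k : Int)) (some (s.length : Int)) = [s[k]] := by
        rw [PySem.List.slice_toNat _ (by positivity) (by positivity)]
        simp only [Int.toNat_natCast]
        rw [List.drop_eq_getElem_cons hk, List.drop_eq_nil_of_le (by omega)]
        have h1 : s.length - k = 1 := by omega
        rw [h1]
        simp
      simp [pvSlices, hslice, hdrop, pvRuns]
    · have hklt : (k : Int) + 1 < (s.length : Int) := by omega
      rw [PySem.List.pyRange_one_cons hklt]
      have hcast : ((k : Int) + 1) = ((k + 1 : Nat) : Int) := by push_cast; ring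
      -- the adjacency test at position k+1, in element form
      have hget : (PySem.List.pyGetD s ((k : Int) + 1) pvResDefault) = s[k+1] := by
        rw [hcast, PySem.List.pyGetD_natCast, List.getD_eq_getElem s pvResDefault (by omega)]
      have hget' : (PySem.List.pyGetD s ((k : Int) + 1 - 1) pvResDefault) = s[k] := by
        have : (k : Int) + 1 - 1 = ((k : Nat) : Int) := by ring
        rw [this, PySem.List.pyGetD_natCast, List.getD_eq_getElem s pvResDefault hk]
      have hdropk : s.drop k = s[k] :: s.drop (k+1) := List.drop_eq_getElem_cons hk
      have hdropk1 : s.drop (k+1) = s[k+1] :: s.drop (k+2) := List.drop_eq_getElem_cons (by omega)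
      by_cases hP : gap < s[k+1].1 - s[k].1
      · -- a gap boundary at k+1: cut here, the run at k is the singleton [s[k]]
        have hd : decide (gap < (PySem.List.pyGetD s ((k:Int)+1) pvResDefault).1 - (PySem.List.pyGetD s ((k:Int)+1-1) pvResDefault).1) = true := by
          rw [hget, hget']; simpa using hP
        rw [List.filter_cons_of_pos (p := fun i => decide (gap < (PySem.List.pyGetD s i pvResDefault).1 - (PySem.List.pyGetD s (i - 1) pvResDefault).1)) (a := (k:Int)+1) (l := PySem.List.pyRange ((k:Int)+1+1) ((s.length:Nat):Int) 1) hd, List.cons_append, pvSlices_cons]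
        rw [hcast]
        rw [ih (k+1) (by omega) (by omega)]
        have hslice1 : PySem.List.slice s (some ((k:Nat) : Int)) (some ((k+1 : Nat) : Int)) = [s[k]] := by
          rw [PySem.List.slice_natCast]
          have h1 : k + 1 - k = 1 := by omega
          rw [h1, hdropk, List.take_succ_cons, List.take_zero]
        rw [hslice1, hdropk, hdropk1, pvRuns]
        rw [if_neg (by omega)]
      · -- no boundary at k+1: the first slice swallows s[k] and continues from k+1
        have hd : decide (gap < (PySem.List.pyGetD s ((k:Int)+1) pvResDefault).1 - (PySem.List.pyGetD s ((k:Int)+1-1) pvResDefault).1) = false := by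
          rw [hget, hget']; exact decide_eq_false (by omega)
        have hd' : ¬ (decide (gap < (PySem.List.pyGetD s ((k:Int)+1) pvResDefault).1 - (PySem.List.pyGetD s ((k:Int)+1-1) pvResDefault).1) = true) := by
          exact ne_true_of_eq_false hd
        rw [List.filter_cons_of_neg (p := fun i => decide (gap < (PySem.List.pyGetD s i pvResDefault).1 - (PySem.List.pyGetD s (i - 1) pvResDefault).1)) (a := (k:Int)+1) (l := PySem.List.pyRange ((k:Int)+1+1) ((s.length:Nat):Int) 1) hd']
        rw [hcast]
        obtain ⟨b, l, hbl⟩ : ∃ b l,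
            (PySem.List.pyRange (((k+1 : Nat) : Int) + 1) (s.length : Int) 1).filter (fun i =>
              decide (gap < (PySem.List.pyGetD s i pvResDefault).1 - (PySem.List.pyGetD s (i - 1) pvResDefault).1))
            ++ [(s.length : Int)] = b :: l := by
          cases h : (PySem.List.pyRange (((k+1 : Nat) : Int) + 1) (s.length : Int) 1).filter (fun i =>
              decide (gap < (PySem.List.pyGetD s i pvResDefault).1 - (PySem.List.pyGetD s (i - 1) pvResDefault).1)) with
          | nil => exact ⟨_, _, rfl⟩
          | cons f r' => exact ⟨f, r' ++ [(s.length : Int)], rfl⟩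
        have hbmem : (k : Int) < b := by
          rcases hf : (PySem.List.pyRange (((k+1 : Nat) : Int) + 1) (s.length : Int) 1).filter (fun i =>
              decide (gap < (PySem.List.pyGetD s i pvResDefault).1 - (PySem.List.pyGetD s (i - 1) pvResDefault).1)) with _ | ⟨f, r'⟩
          · rw [hf] at hbl; simp at hbl; omega
          · rw [hf] at hbl
            simp only [List.cons_append, List.cons.injEq] at hbl
            have : f ∈ PySem.List.pyRange (((k+1 : Nat) : Int) + 1) (s.length : Int) 1 :=
              List.mem_of_mem_filter (by rw [hf]; exact List.mem_cons_self)
            have := (PySem.List.mem_pyRange_one).mp this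
            omega
        rw [hbl, pvSlices_cons, pvSlice_cons_step s k b hk hbmem]
        have ihk1 := ih (k+1) (by omega) (by omega)
        rw [hbl, pvSlices_cons] at ihk1
        rw [hdropk, hdropk1, pvRuns, if_pos (by omega)]
        rw [← hdropk1, ← ihk1]
        rw [hcast]

-- ===== VERDICT (by name: the statement is the Claim_ definition above) =====
theorem cluster_sequential_residues_spec : Claim_equal_cluster_sequential_residues := by
  intro pocket_residues gap_tolerance _
  unfold Spec_cluster_sequential_residues
  unfold cluster_sequential_residues cluster_sequential_residues_alt
  by_cases hpr : pocket_residues = []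
  · subst hpr
    have hs0 : PySem.List.sorted ([] : List (Int × String × Int)) (fun x => x.1) false = [] := rfl
    simp [hs0, PySem.List.pyRange_one_eq_nil, PySem.List.slice]
  · rw [if_neg hpr]
    rcases hs : PySem.List.sorted pocket_residues (fun x => x.1) false with _ | ⟨x, rest⟩
    · exact absurd hs (by rw [PySem.List.sorted_eq_nil_iff]; exact hpr)
    · simp only []
      rw [pvFoldA_pairs (x :: rest)
        (F := fun p c st => if c.1 - p.1 ≤ gap_tolerance then (st.1, st.2 ++ [c])
          else ((if 3 ≤ st.2.length then st.1 ++ [st.2] else st.1), [c]))]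
      simp only [PySem.List.pyGetD_zero_cons, List.tail_cons]
      have hA := pvLoopA_eq gap_tolerance rest x [] []
      simp only [List.nil_append] at hA
      rw [hA, pvMapHead_nil]
      have hB := pvSlices_eq_aux gap_tolerance (x :: rest) (x :: rest).length 0 (by simp) rfl
      simp only [Nat.cast_zero, List.drop_zero] at hB
      have h01 : ((0 : Int) + 1) = 1 := by ring
      rw [h01] at hB
      simp only [List.length_cons] at hB
      push_cast at hB
      rw [← hB]
      simp [pvSlices]
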